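-- pv_equiv track=rewrite | github.com/Ruales1138/Analisis-Y-Diseno-De-Algoritmos | recurcion_cola_no_cola/remplazar_mitad_tail.py | remplazar_mitad
-- ===== SOURCE A (Python) =====
-- def remplazar_mitad(string, inicio=None, fin=None):
--     if inicio is None:
--         inicio = 0
--     if fin is None:
--         fin = len(string) - 1
--     if inicio == fin:
--         return string
--     if string[inicio].isdigit() and string[fin].isdigit():
--         largo = fin - inicio + 1
--         if largo % 2 == 0:
--             mitad = inicio + (largo // 2)
--             return string.replace(string[mitad], '0')
--         else:
--             return string
--     if string[inicio].isdigit():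
--         return remplazar_mitad(string, inicio, fin - 1)
--     else:
--         return remplazar_mitad(string, inicio + 1, fin)
-- ===== SOURCE B (Python) =====
-- def remplazar_mitad(string, inicio=None, fin=None):
--     # Iterative two-scan version: find the first digit from the left edge,
--     # then the last digit from the right edge, then decide once.
--     i = 0 if inicio is None else inicio
--     j = len(string) - 1 if fin is None else fin
--     while i != j and not string[i].isdigit():
--         i += 1
--     while j != i and not string[j].isdigit():
--         j -= 1
--     if i == j:
--         return string
--     largo = j - i + 1
--     if largo % 2 != 0:
--         return string
--     return string.replace(string[i + largo // 2], '0')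
-- ===== Notes on version B (the rewrite author's own statement) =====
-- stated objective: alternative
-- what changed: A's single tail recursion that interleaves index checks is replaced by two independent iterative scans (first digit from the left edge, last digit down from the right edge) followed by one closing decision, so each character's isdigit is tested once instead of twice per step.
import Mathlib
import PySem

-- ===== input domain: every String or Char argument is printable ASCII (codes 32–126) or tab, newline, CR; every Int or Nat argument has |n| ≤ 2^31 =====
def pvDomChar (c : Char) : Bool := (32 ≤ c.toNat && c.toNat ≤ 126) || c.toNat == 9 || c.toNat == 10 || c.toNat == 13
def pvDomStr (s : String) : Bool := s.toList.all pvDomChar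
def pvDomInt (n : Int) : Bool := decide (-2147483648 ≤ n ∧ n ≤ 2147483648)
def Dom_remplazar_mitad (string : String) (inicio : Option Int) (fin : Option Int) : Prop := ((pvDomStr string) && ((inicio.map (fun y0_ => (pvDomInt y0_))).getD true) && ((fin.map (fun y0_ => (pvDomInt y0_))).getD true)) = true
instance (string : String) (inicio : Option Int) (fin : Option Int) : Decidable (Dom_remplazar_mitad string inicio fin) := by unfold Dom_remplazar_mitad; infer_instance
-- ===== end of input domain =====

-- B replaces A's tail recursion by two independent index scans (first digit from the left edge,
-- last digit from the right edge) followed by a single closing decision: objective 'alternative'.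

-- ===== PORT A =====
-- A's tail recursion; the Nat argument is fuel making the recursion total (generous: Pre_ inputs
-- never exhaust it); 'none' from pyGet? is Python's IndexError, excluded by Pre_.
def remplazar_mitad_go (s : String) : Nat → Int → Int → String
  | 0, _, _ => s
  | fuel+1, inicio, fin =>
    if inicio = fin then s
    else
      match PySem.Str.pyGet? s inicio with
      | none => s   -- IndexError (outside Pre_)
      | some ci =>
        if PySem.Chars.isdigit ci = true then
          match PySem.Str.pyGet? s fin with
          | none => s   -- IndexError (outside Pre_)
          | some cj =>
            if PySem.Chars.isdigit cj = true then
              let largo := fin - inicio + 1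
              if PySem.Int.mod largo 2 = 0 then
                match PySem.Str.pyGet? s (inicio + PySem.Int.floordiv largo 2) with
                | none => s   -- IndexError (outside Pre_)
                | some cm => PySem.Str.replace s (String.ofList [cm]) "0"
              else s
            else remplazar_mitad_go s fuel inicio (fin - 1)
        else remplazar_mitad_go s fuel (inicio + 1) fin

def remplazar_mitad (string : String) (inicio : Option Int) (fin : Option Int) : String :=
  let n := PySem.Str.len string
  let i := inicio.getD 0
  let j := fin.getD (n - 1)
  remplazar_mitad_go string ((j - i).toNat + (n - i).toNat + (j + n).toNat + 1) i j

-- ===== PORT B =====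
-- first loop of Source B: advance i while i != j and s[i] is not a digit; returns the final i
def remplazar_alt_scan1 (s : String) : Nat → Int → Int → Int
  | 0, i, _ => i
  | fuel+1, i, j =>
    if i = j then i
    else
      match PySem.Str.pyGet? s i with
      | none => i   -- IndexError (outside Pre_)
      | some c => if PySem.Chars.isdigit c = true then i else remplazar_alt_scan1 s fuel (i+1) j

-- second loop of Source B: move j down while j != i and s[j] is not a digit; returns the final j
def remplazar_alt_scan2 (s : String) : Nat → Int → Int → Int
  | 0, _, j => j
  | fuel+1, i, j =>
    if j = i then j
    else
      match PySem.Str.pyGet? s j with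
      | none => j   -- IndexError (outside Pre_)
      | some c => if PySem.Chars.isdigit c = true then j else remplazar_alt_scan2 s fuel i (j-1)

def remplazar_mitad_alt (string : String) (inicio : Option Int) (fin : Option Int) : String :=
  let n := PySem.Str.len string
  let i0 := inicio.getD 0
  let j0 := fin.getD (n - 1)
  let i := remplazar_alt_scan1 string ((j0 - i0).toNat + (n - i0).toNat + 1) i0 j0
  let j := remplazar_alt_scan2 string ((j0 - i).toNat + (j0 + n).toNat + 1) i j0
  if i = j then string
  else
    let largo := j - i + 1
    if PySem.Int.mod largo 2 ≠ 0 then string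
    else
      match PySem.Str.pyGet? string (i + PySem.Int.floordiv largo 2) with
      | none => string   -- IndexError (outside Pre_)
      | some cm => PySem.Str.replace string (String.ofList [cm]) "0"

-- ===== PRECONDITION & SPEC =====
-- true iff index k is in Python's range for s and s[k] is a digit
def pvDig (s : String) (k : Int) : Bool :=
  match PySem.Str.pyGet? s k with
  | some c => PySem.Chars.isdigit c
  | none => false

-- Pre_ = exactly the inputs on which the Python A returns (no IndexError): either the window is
-- empty at once (i0 = j0), or the left scan meets j0 over valid non-digits, or the left scan
-- reaches a first digit i* and from there the function terminates (right char digit, or a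
-- down-scan that meets i* or a digit j* over valid indices).
def Pre_remplazar_mitad (string : String) (inicio : Option Int) (fin : Option Int) : Prop :=
  let n := PySem.Str.len string
  let i0 := inicio.getD 0
  let j0 := fin.getD (n - 1)
  i0 = j0
  ∨ (i0 < j0 ∧ -n ≤ i0 ∧ j0 ≤ n ∧ ∀ k ∈ PySem.List.pyRange i0 j0 1, pvDig string k = false)
  ∨ (-n ≤ i0 ∧ -n ≤ j0 ∧ j0 < n ∧
      ∃ is ∈ PySem.List.pyRange i0 n 1,
        (∀ k ∈ PySem.List.pyRange i0 is 1, pvDig string k = false) ∧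
        pvDig string is = true ∧
        (j0 < i0 ∨ is < j0) ∧
        (pvDig string j0 = true ∨ is < j0 ∨
          (j0 < is ∧ ∃ js ∈ PySem.List.pyRange (-n) (j0+1) 1, pvDig string js = true ∧
            ∀ k ∈ PySem.List.pyRange (js+1) (j0+1) 1, pvDig string k = false)))

instance (string : String) (inicio : Option Int) (fin : Option Int) : Decidable (Pre_remplazar_mitad string inicio fin) := by
  unfold Pre_remplazar_mitad; infer_instance

def pvWitness_remplazar_mitad : String × Option Int × Option Int := ("a1b2", none, none)

def Spec_remplazar_mitad (string : String) (inicio : Option Int) (fin : Option Int) (out : String) : Prop := out = remplazar_mitad_alt string inicio fin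
instance (string : String) (inicio : Option Int) (fin : Option Int) (out : String) : Decidable (Spec_remplazar_mitad string inicio fin out) := by unfold Spec_remplazar_mitad; infer_instance

-- ===== CLAIM (what is proved, stated in full; the proofs are below) =====
def Claim_equal_remplazar_mitad : Prop := ∀ (string : String) (inicio : Option Int) (fin : Option Int), Dom_remplazar_mitad string inicio fin → Pre_remplazar_mitad string inicio fin → Spec_remplazar_mitad string inicio fin (remplazar_mitad string inicio fin)

-- ===== LEMMAS AND PROOFS =====

-- a valid Python index yields a character
lemma pv_get_some (s : String) (k : Int) (h1 : -PySem.Str.len s ≤ k) (h2 : k < PySem.Str.len s) :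
    ∃ c, PySem.List.pyGet? s.toList k = some c := by
  cases h : PySem.List.pyGet? s.toList k with
  | some c => exact ⟨c, rfl⟩
  | none =>
      exfalso
      have hl : PySem.Str.len s = (s.toList.length : Int) := by
        simp [PySem.Str.len_eq]
      rw [hl] at h1 h2
      have := (PySem.List.pyGet?_eq_none_iff s.toList k).mp h
      exact this (by constructor <;> omega)

-- pvDig true yields a digit character
lemma pv_dig_some (s : String) (k : Int) (h : pvDig s k = true) :
    ∃ c, PySem.List.pyGet? s.toList k = some c ∧ PySem.Chars.isdigit c = true := by
  unfold pvDig at h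
  rw [show PySem.Str.pyGet? s k = PySem.List.pyGet? s.toList k from by simp] at h
  cases hg : PySem.List.pyGet? s.toList k with
  | some c => exact ⟨c, rfl, by rwa [hg] at h⟩
  | none => rw [hg] at h; cases h

-- the shared terminal expression (both ports compute it once two digits face each other)
def pvFin (s : String) (i j : Int) : String :=
  if PySem.Int.mod (j - i + 1) 2 = 0 then
    match PySem.Str.pyGet? s (i + PySem.Int.floordiv (j - i + 1) 2) with
    | none => s
    | some cm => PySem.Str.replace s (String.ofList [cm]) "0"
  else s

-- A's one terminal step
lemma pv_go_terminal (s : String) (f : Nat) (i j : Int) (hne : i ≠ j)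
    (hdi : pvDig s i = true) (hdj : pvDig s j = true) :
    remplazar_mitad_go s (f+1) i j = pvFin s i j := by
  obtain ⟨ci, hci, hdci⟩ := pv_dig_some s i hdi
  obtain ⟨cj, hcj, hdcj⟩ := pv_dig_some s j hdj
  simp [remplazar_mitad_go, hne, hci, hcj, hdci, hdcj, pvFin]

-- scan2's one terminal step
lemma pv_scan2_terminal (s : String) (f : Nat) (i j : Int) (hne : j ≠ i)
    (hdj : pvDig s j = true) :
    remplazar_alt_scan2 s (f+1) i j = j := by
  obtain ⟨cj, hcj, hdcj⟩ := pv_dig_some s j hdj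
  simp [remplazar_alt_scan2, hne, hcj, hdcj]

-- phase 1: both A's recursion and B's first scan walk i over valid non-digit positions ≠ j0
lemma pv_phase1 (s : String) (j0 : Int) :
    ∀ (t : Nat) (i : Int) (f g : Nat),
      (∀ k, i ≤ k → k < i + t → pvDig s k = false ∧ k ≠ j0 ∧
          -PySem.Str.len s ≤ k ∧ k < PySem.Str.len s) →
      remplazar_mitad_go s (t + f) i j0 = remplazar_mitad_go s f (i + t) j0
      ∧ remplazar_alt_scan1 s (t + g) i j0 = remplazar_alt_scan1 s g (i + t) j0 := by
  intro t
  induction t with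
  | zero => intro i f g _; simp
  | succ t ih =>
      intro i f g hk
      obtain ⟨hnd, hne, hlo, hhi⟩ := hk i (le_refl i) (by omega)
      obtain ⟨c, hc⟩ := pv_get_some s i hlo hhi
      have hndc : PySem.Chars.isdigit c = false := by
        unfold pvDig at hnd
        rw [show PySem.Str.pyGet? s i = PySem.List.pyGet? s.toList i from by simp, hc] at hnd
        exact hnd
      have h1 : t + 1 + f = (t + f) + 1 := by omega
      have h2 : t + 1 + g = (t + g) + 1 := by omega
      rw [h1, h2]
      have step1 : remplazar_mitad_go s ((t + f) + 1) i j0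
          = remplazar_mitad_go s (t + f) (i + 1) j0 := by
        simp [remplazar_mitad_go, hne, hc, hndc]
      have step2 : remplazar_alt_scan1 s ((t + g) + 1) i j0
          = remplazar_alt_scan1 s (t + g) (i + 1) j0 := by
        simp [remplazar_alt_scan1, hne, hc, hndc]
      have hk' : ∀ k, i + 1 ≤ k → k < (i + 1) + t → pvDig s k = false ∧ k ≠ j0 ∧
          -PySem.Str.len s ≤ k ∧ k < PySem.Str.len s := by
        intro k h1 h2; exact hk k (by omega) (by omega)
      obtain ⟨ihA, ihB⟩ := ih (i + 1) f g hk'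
      rw [step1, step2, ihA, ihB]
      constructor <;> · congr 1; push_cast; ring

-- phase 2 (A fixed on a digit at i): both A's recursion and B's second scan walk j down
-- over valid non-digit positions ≠ i
lemma pv_phase2 (s : String) (i : Int) (hdi : pvDig s i = true) :
    ∀ (t : Nat) (j : Int) (f g : Nat),
      (∀ k, j - t < k → k ≤ j → pvDig s k = false ∧ k ≠ i ∧
          -PySem.Str.len s ≤ k ∧ k < PySem.Str.len s) →
      remplazar_mitad_go s (t + f) i j = remplazar_mitad_go s f i (j - t)
      ∧ remplazar_alt_scan2 s (t + g) i j = remplazar_alt_scan2 s g i (j - t) := by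
  obtain ⟨ci, hci, hdci⟩ := pv_dig_some s i hdi
  intro t
  induction t with
  | zero => intro j f g _; simp
  | succ t ih =>
      intro j f g hk
      obtain ⟨hnd, hne, hlo, hhi⟩ := hk j (by omega) (le_refl j)
      obtain ⟨c, hc⟩ := pv_get_some s j hlo hhi
      have hndc : PySem.Chars.isdigit c = false := by
        unfold pvDig at hnd
        rw [show PySem.Str.pyGet? s j = PySem.List.pyGet? s.toList j from by simp, hc] at hnd
        exact hnd
      have hne' : i ≠ j := fun h => hne h.symm
      have h1 : t + 1 + f = (t + f) + 1 := by omega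
      have h2 : t + 1 + g = (t + g) + 1 := by omega
      rw [h1, h2]
      have step1 : remplazar_mitad_go s ((t + f) + 1) i j
          = remplazar_mitad_go s (t + f) i (j - 1) := by
        simp [remplazar_mitad_go, hne', hci, hdci, hc, hndc]
      have step2 : remplazar_alt_scan2 s ((t + g) + 1) i j
          = remplazar_alt_scan2 s (t + g) i (j - 1) := by
        simp [remplazar_alt_scan2, hne, hc, hndc]
      have hk' : ∀ k, (j - 1) - t < k → k ≤ j - 1 → pvDig s k = false ∧ k ≠ i ∧
          -PySem.Str.len s ≤ k ∧ k < PySem.Str.len s := by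
        intro k h1 h2; exact hk k (by omega) (by omega)
      obtain ⟨ihA, ihB⟩ := ih (j - 1) f g hk'
      rw [step1, step2, ihA, ihB]
      constructor <;> · congr 1; push_cast; ring

-- interleaved phase 2 when i < j in the valid window: A's recursion equals pvFin at B's scan2 stop,
-- whether the down-scan ends on a digit or meets i
lemma pv_lemma2 (s : String) (i : Int) (hdi : pvDig s i = true)
    (hlo : -PySem.Str.len s ≤ i) :
    ∀ (g : Nat) (j : Int) (f1 f2 : Nat),
      i ≤ j → j < PySem.Str.len s → (j - i).toNat = g → g < f1 → g < f2 →
      remplazar_mitad_go s f1 i j =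
        (if i = remplazar_alt_scan2 s f2 i j then s else pvFin s i (remplazar_alt_scan2 s f2 i j)) := by
  intro g
  induction g with
  | zero =>
      intro j f1 f2 hij hjn htn hf1 hf2
      have hji : j = i := by omega
      obtain ⟨f1', rfl⟩ : ∃ f1', f1 = f1' + 1 := ⟨f1 - 1, by omega⟩
      obtain ⟨f2', rfl⟩ : ∃ f2', f2 = f2' + 1 := ⟨f2 - 1, by omega⟩
      subst hji
      simp [remplazar_mitad_go, remplazar_alt_scan2]
  | succ g ih =>
      intro j f1 f2 hij hjn htn hf1 hf2
      have hlt : i < j := by omega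
      have hne : i ≠ j := by omega
      have hne' : j ≠ i := by omega
      obtain ⟨f1', rfl⟩ : ∃ f1', f1 = f1' + 1 := ⟨f1 - 1, by omega⟩
      obtain ⟨f2', rfl⟩ : ∃ f2', f2 = f2' + 1 := ⟨f2 - 1, by omega⟩
      cases hdj : pvDig s j with
      | true =>
          rw [pv_go_terminal s f1' i j hne hdi hdj, pv_scan2_terminal s f2' i j hne' hdj,
            if_neg hne]
      | false =>
          obtain ⟨ci, hci, hdci⟩ := pv_dig_some s i hdi
          obtain ⟨c, hc⟩ := pv_get_some s j (by omega) hjn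
          have hndc : PySem.Chars.isdigit c = false := by
            unfold pvDig at hdj
            rw [show PySem.Str.pyGet? s j = PySem.List.pyGet? s.toList j from by simp, hc] at hdj
            exact hdj
          have step1 : remplazar_mitad_go s (f1' + 1) i j
              = remplazar_mitad_go s f1' i (j - 1) := by
            simp [remplazar_mitad_go, hne, hci, hdci, hc, hndc]
          have step2 : remplazar_alt_scan2 s (f2' + 1) i j
              = remplazar_alt_scan2 s f2' i (j - 1) := by
            simp [remplazar_alt_scan2, hne', hc, hndc]
          rw [step1, step2]
          exact ih (j - 1) f1' f2' (by omega) (by omega) (by omega) (by omega) (by omega)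

-- B's closing decision is the shared terminal expression
lemma pv_alt_tail (s : String) (i j : Int) :
    (if i = j then s
     else if PySem.Int.mod (j - i + 1) 2 ≠ 0 then s
     else
       match PySem.Str.pyGet? s (i + PySem.Int.floordiv (j - i + 1) 2) with
       | none => s
       | some cm => PySem.Str.replace s (String.ofList [cm]) "0")
    = (if i = j then s else pvFin s i j) := by
  by_cases hij : i = j
  · rw [if_pos hij, if_pos hij]
  · rw [if_neg hij, if_neg hij]
    unfold pvFin
    by_cases hm : PySem.Int.mod (j - i + 1) 2 = 0
    · rw [if_neg (not_not_intro hm), if_pos hm]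
    · rw [if_pos hm, if_neg hm]


-- main lemma: under Pre_'s body (with n, i0, j0 spelled out), A's recursion equals B's
-- two scans followed by the closing decision
lemma pv_main (s : String) (i0 j0 : Int)
    (hpre : i0 = j0
      ∨ (i0 < j0 ∧ -PySem.Str.len s ≤ i0 ∧ j0 ≤ PySem.Str.len s ∧
          ∀ k ∈ PySem.List.pyRange i0 j0 1, pvDig s k = false)
      ∨ (-PySem.Str.len s ≤ i0 ∧ -PySem.Str.len s ≤ j0 ∧ j0 < PySem.Str.len s ∧
          ∃ is ∈ PySem.List.pyRange i0 (PySem.Str.len s) 1,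
            (∀ k ∈ PySem.List.pyRange i0 is 1, pvDig s k = false) ∧
            pvDig s is = true ∧
            (j0 < i0 ∨ is < j0) ∧
            (pvDig s j0 = true ∨ is < j0 ∨
              (j0 < is ∧ ∃ js ∈ PySem.List.pyRange (-(PySem.Str.len s)) (j0+1) 1,
                pvDig s js = true ∧
                ∀ k ∈ PySem.List.pyRange (js+1) (j0+1) 1, pvDig s k = false)))) :
    ∃ i' j',
      remplazar_alt_scan1 s ((j0 - i0).toNat + (PySem.Str.len s - i0).toNat + 1) i0 j0 = i'
      ∧ remplazar_alt_scan2 s ((j0 - i').toNat + (j0 + PySem.Str.len s).toNat + 1) i' j0 = j'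
      ∧ remplazar_mitad_go s
          ((j0 - i0).toNat + (PySem.Str.len s - i0).toNat + (j0 + PySem.Str.len s).toNat + 1) i0 j0
        = (if i' = j' then s else pvFin s i' j') := by
  have hnn : (0:Int) ≤ PySem.Str.len s := by
    have : PySem.Str.len s = (s.toList.length : Int) := by simp [PySem.Str.len_eq]
    rw [this]; exact Int.natCast_nonneg _
  rcases hpre with h0 | ⟨hlt, hloi, hjle, hnd⟩ | ⟨hloi, hloj, hjn, is, hismem, hnd1, hdig, hd, hg⟩
  · -- C0 : i0 = j0
    subst h0
    refine ⟨i0, i0, ?_, ?_, ?_⟩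
    · simp [remplazar_alt_scan1]
    · simp [remplazar_alt_scan2]
    · simp [remplazar_mitad_go]
  · -- C1 : the left scan meets j0 over valid non-digits
    have hnds : ∀ k, i0 ≤ k → k < j0 → pvDig s k = false := by
      intro k h1 h2; exact hnd k (PySem.List.mem_pyRange_one.mpr ⟨h1, h2⟩)
    have H : ∀ k, i0 ≤ k → k < i0 + ((j0 - i0).toNat : Int) → pvDig s k = false ∧ k ≠ j0 ∧
        -PySem.Str.len s ≤ k ∧ k < PySem.Str.len s := by
      intro k h1 h2
      have hk2 : k < j0 := by omega
      exact ⟨hnds k h1 hk2, by omega, by omega, by omega⟩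
    obtain ⟨hP1A, hP1B⟩ := pv_phase1 s j0 ((j0 - i0).toNat) i0
      ((j0 - i0).toNat + (PySem.Str.len s - i0).toNat + (j0 + PySem.Str.len s).toNat + 1 - (j0 - i0).toNat)
      ((j0 - i0).toNat + (PySem.Str.len s - i0).toNat + 1 - (j0 - i0).toNat) H
    have hit : i0 + (((j0 - i0).toNat : Nat) : Int) = j0 := by omega
    rw [hit] at hP1A hP1B
    have e1 : (j0 - i0).toNat + (PySem.Str.len s - i0).toNat + 1
        = (j0 - i0).toNat + ((j0 - i0).toNat + (PySem.Str.len s - i0).toNat + 1 - (j0 - i0).toNat) := by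
      omega
    have e2 : (j0 - i0).toNat + (PySem.Str.len s - i0).toNat + (j0 + PySem.Str.len s).toNat + 1
        = (j0 - i0).toNat + ((j0 - i0).toNat + (PySem.Str.len s - i0).toNat + (j0 + PySem.Str.len s).toNat + 1 - (j0 - i0).toNat) := by
      omega
    obtain ⟨m1, hm1⟩ : ∃ m1, (j0 - i0).toNat + (PySem.Str.len s - i0).toNat + 1 - (j0 - i0).toNat = m1 + 1 := ⟨(j0 - i0).toNat + (PySem.Str.len s - i0).toNat + 1 - (j0 - i0).toNat - 1, by omega⟩
    obtain ⟨m2, hm2⟩ : ∃ m2, (j0 - i0).toNat + (PySem.Str.len s - i0).toNat + (j0 + PySem.Str.len s).toNat + 1 - (j0 - i0).toNat = m2 + 1 := ⟨(j0 - i0).toNat + (PySem.Str.len s - i0).toNat + (j0 + PySem.Str.len s).toNat + 1 - (j0 - i0).toNat - 1, by omega⟩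
    refine ⟨j0, j0, ?_, ?_, ?_⟩
    · rw [e1, hP1B, hm1]; simp [remplazar_alt_scan1]
    · simp [remplazar_alt_scan2]
    · rw [e2, hP1A, hm2]; simp [remplazar_mitad_go]
  · -- C2 : the left scan reaches a first digit at is
    obtain ⟨hi0is, hisn⟩ := PySem.List.mem_pyRange_one.mp hismem
    have hisne : is ≠ j0 := by rcases hd with h | h <;> omega
    have hnd1' : ∀ k, i0 ≤ k → k < is → pvDig s k = false := by
      intro k h1 h2; exact hnd1 k (PySem.List.mem_pyRange_one.mpr ⟨h1, h2⟩)
    have H1 : ∀ k, i0 ≤ k → k < i0 + (((is - i0).toNat : Nat) : Int) → pvDig s k = false ∧ k ≠ j0 ∧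
        -PySem.Str.len s ≤ k ∧ k < PySem.Str.len s := by
      intro k h1 h2
      have hk2 : k < is := by omega
      refine ⟨hnd1' k h1 hk2, ?_, by omega, by omega⟩
      rcases hd with h | h <;> omega
    obtain ⟨hP1A, hP1B⟩ := pv_phase1 s j0 ((is - i0).toNat) i0
      ((j0 - i0).toNat + (PySem.Str.len s - i0).toNat + (j0 + PySem.Str.len s).toNat + 1 - (is - i0).toNat)
      ((j0 - i0).toNat + (PySem.Str.len s - i0).toNat + 1 - (is - i0).toNat) H1
    have hit : i0 + (((is - i0).toNat : Nat) : Int) = is := by omega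
    rw [hit] at hP1A hP1B
    have e1 : (j0 - i0).toNat + (PySem.Str.len s - i0).toNat + 1
        = (is - i0).toNat + ((j0 - i0).toNat + (PySem.Str.len s - i0).toNat + 1 - (is - i0).toNat) := by
      omega
    have e2 : (j0 - i0).toNat + (PySem.Str.len s - i0).toNat + (j0 + PySem.Str.len s).toNat + 1
        = (is - i0).toNat + ((j0 - i0).toNat + (PySem.Str.len s - i0).toNat + (j0 + PySem.Str.len s).toNat + 1 - (is - i0).toNat) := by
      omega
    obtain ⟨ci, hci, hdci⟩ := pv_dig_some s is hdig
    obtain ⟨m1, hm1⟩ : ∃ m1, (j0 - i0).toNat + (PySem.Str.len s - i0).toNat + 1 - (is - i0).toNat = m1 + 1 := ⟨(j0 - i0).toNat + (PySem.Str.len s - i0).toNat + 1 - (is - i0).toNat - 1, by omega⟩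
    have hscan1 : remplazar_alt_scan1 s ((j0 - i0).toNat + (PySem.Str.len s - i0).toNat + 1) i0 j0 = is := by
      rw [e1, hP1B, hm1]
      simp [remplazar_alt_scan1, hisne, hci, hdci]
    have hgoA : remplazar_mitad_go s
        ((j0 - i0).toNat + (PySem.Str.len s - i0).toNat + (j0 + PySem.Str.len s).toNat + 1) i0 j0
        = remplazar_mitad_go s
            ((j0 - i0).toNat + (PySem.Str.len s - i0).toNat + (j0 + PySem.Str.len s).toNat + 1 - (is - i0).toNat) is j0 := by
      conv_lhs => rw [e2]
      rw [hP1A]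
    by_cases hdj : pvDig s j0 = true
    · -- right end is a digit: both terminate at (is, j0)
      obtain ⟨m2, hm2⟩ : ∃ m2, (j0 - i0).toNat + (PySem.Str.len s - i0).toNat + (j0 + PySem.Str.len s).toNat + 1 - (is - i0).toNat = m2 + 1 := ⟨(j0 - i0).toNat + (PySem.Str.len s - i0).toNat + (j0 + PySem.Str.len s).toNat + 1 - (is - i0).toNat - 1, by omega⟩
      refine ⟨is, j0, hscan1, ?_, ?_⟩
      · obtain ⟨m3, hm3⟩ : ∃ m3, (j0 - is).toNat + (j0 + PySem.Str.len s).toNat + 1 = m3 + 1 := ⟨(j0 - is).toNat + (j0 + PySem.Str.len s).toNat, by omega⟩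
        rw [hm3]
        exact pv_scan2_terminal s m3 is j0 (fun h => hisne h.symm) hdj
      · rw [hgoA, hm2, pv_go_terminal s m2 is j0 hisne hdig hdj, if_neg hisne]
    · rw [Bool.not_eq_true] at hdj
      rcases hg with hga | hgb | ⟨hjis, js, hjsmem, hjsd, hnd2⟩
      · rw [hga] at hdj; cases hdj
      · -- is < j0 : interleaved down-scan inside the valid window
        refine ⟨is, remplazar_alt_scan2 s ((j0 - is).toNat + (j0 + PySem.Str.len s).toNat + 1) is j0,
          hscan1, rfl, ?_⟩
        rw [hgoA]
        exact pv_lemma2 s is hdig (by omega) ((j0 - is).toNat) j0 _ _ (by omega) hjn rfl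
          (by omega) (by omega)
      · -- j0 < is : the down-scan runs to the digit at js
        obtain ⟨hjslo, hjshi⟩ := PySem.List.mem_pyRange_one.mp hjsmem
        have hjsj0 : js ≤ j0 := by omega
        have hnd2' : ∀ k, js < k → k ≤ j0 → pvDig s k = false := by
          intro k h1 h2; exact hnd2 k (PySem.List.mem_pyRange_one.mpr ⟨by omega, by omega⟩)
        have H2 : ∀ k, j0 - (((j0 - js).toNat : Nat) : Int) < k → k ≤ j0 → pvDig s k = false ∧ k ≠ is ∧
            -PySem.Str.len s ≤ k ∧ k < PySem.Str.len s := by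
          intro k h1 h2
          exact ⟨hnd2' k (by omega) h2, by omega, by omega, by omega⟩
        obtain ⟨hP2A, hP2B⟩ := pv_phase2 s is hdig ((j0 - js).toNat) j0
          ((j0 - i0).toNat + (PySem.Str.len s - i0).toNat + (j0 + PySem.Str.len s).toNat + 1 - (is - i0).toNat - (j0 - js).toNat)
          ((j0 - is).toNat + (j0 + PySem.Str.len s).toNat + 1 - (j0 - js).toNat) H2
        have hjt : j0 - (((j0 - js).toNat : Nat) : Int) = js := by omega
        rw [hjt] at hP2A hP2B
        have e3 : (j0 - i0).toNat + (PySem.Str.len s - i0).toNat + (j0 + PySem.Str.len s).toNat + 1 - (is - i0).toNat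
            = (j0 - js).toNat + ((j0 - i0).toNat + (PySem.Str.len s - i0).toNat + (j0 + PySem.Str.len s).toNat + 1 - (is - i0).toNat - (j0 - js).toNat) := by
          omega
        have e4 : (j0 - is).toNat + (j0 + PySem.Str.len s).toNat + 1
            = (j0 - js).toNat + ((j0 - is).toNat + (j0 + PySem.Str.len s).toNat + 1 - (j0 - js).toNat) := by
          omega
        obtain ⟨m4, hm4⟩ : ∃ m4, (j0 - i0).toNat + (PySem.Str.len s - i0).toNat + (j0 + PySem.Str.len s).toNat + 1 - (is - i0).toNat - (j0 - js).toNat = m4 + 1 := ⟨(j0 - i0).toNat + (PySem.Str.len s - i0).toNat + (j0 + PySem.Str.len s).toNat + 1 - (is - i0).toNat - (j0 - js).toNat - 1, by omega⟩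
        obtain ⟨m5, hm5⟩ : ∃ m5, (j0 - is).toNat + (j0 + PySem.Str.len s).toNat + 1 - (j0 - js).toNat = m5 + 1 := ⟨(j0 - is).toNat + (j0 + PySem.Str.len s).toNat + 1 - (j0 - js).toNat - 1, by omega⟩
        have hisjs : is ≠ js := by omega
        refine ⟨is, js, hscan1, ?_, ?_⟩
        · rw [e4, hP2B, hm5]
          exact pv_scan2_terminal s m5 is js (by omega) hjsd
        · rw [hgoA, e3, hP2A, hm4, pv_go_terminal s m4 is js hisjs hdig hjsd, if_neg hisjs]

-- ===== VERDICT (by name: the statement is the Claim_ definition above) =====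
theorem remplazar_mitad_spec : Claim_equal_remplazar_mitad := by
  intro s a b _ hpre
  unfold Spec_remplazar_mitad
  unfold Pre_remplazar_mitad at hpre
  simp only [] at hpre
  obtain ⟨i', j', hscan1, hscan2, hA⟩ :=
    pv_main s (a.getD 0) (b.getD (PySem.Str.len s - 1)) hpre
  unfold remplazar_mitad remplazar_mitad_alt
  simp only []
  rw [hscan1, hscan2, hA, pv_alt_tail]
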